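-- pv_equiv track=rewrite | github.com/zacbakerr/comp0002 | urgent/statement_checker.py | check_statement1
-- ===== SOURCE A (Python) =====
-- from itertools import permutations
--
-- def shift_char(c, k):
--     """Shift a character by k positions, wrapping from 'z' to 'a'"""
--     return chr((ord(c) - ord('a') + k) % 26 + ord('a'))
--
-- def get_k_shagram(s, k):
--     """Generate all possible k-shagrams of string s"""
--     results = set()
--     for perm in permutations(s):
--         shifted = ''.join(shift_char(c, k) for c in perm)
--         results.add(shifted)
--     return results
--
-- def check_statement1(selected_strings):
--     """Check if all k-shagrams of length-1 words are in selected_strings"""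
--     length_1_words = {s for s in selected_strings if len(s) == 1}
--     for word in length_1_words:
--         for k in range(26):
--             k_shagrams = get_k_shagram(word, k)
--             if not all(shagram in selected_strings for shagram in k_shagrams):
--                 return False
--     return True
-- ===== SOURCE B (Python) =====
-- def check_statement1(selected_strings):
--     if not any(len(s) == 1 for s in selected_strings):
--         return True
--     present = set(selected_strings)
--     return all(chr(ord('a') + i) in present for i in range(26))
-- ===== Notes on version B (the rewrite author's own statement) =====
-- stated objective: simpler
-- what changed: The nested permutations/shift machinery is replaced by a closed-form check: the 26 shifts of any single character always enumerate exactly the lowercase alphabet, so B just tests whether some length-1 word exists and, if so, whether all 26 lowercase letters are in the set of selected strings.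
import Mathlib
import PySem

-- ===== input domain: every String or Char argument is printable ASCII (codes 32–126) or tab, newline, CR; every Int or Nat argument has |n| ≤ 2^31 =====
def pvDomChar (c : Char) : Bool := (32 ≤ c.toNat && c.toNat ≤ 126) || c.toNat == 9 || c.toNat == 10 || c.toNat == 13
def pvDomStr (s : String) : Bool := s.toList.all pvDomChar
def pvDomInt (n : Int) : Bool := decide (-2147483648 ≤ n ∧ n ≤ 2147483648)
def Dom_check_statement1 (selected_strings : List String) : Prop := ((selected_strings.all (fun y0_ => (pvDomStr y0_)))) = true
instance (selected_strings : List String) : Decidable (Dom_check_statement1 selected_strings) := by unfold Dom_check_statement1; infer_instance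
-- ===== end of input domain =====

-- B replaces the permutations/shift machinery by a closed-form check (the 26 shifts of any
-- single character enumerate exactly the lowercase alphabet); objective: simpler.

-- ===== PORT A =====
-- chr((ord(c) - ord('a') + k) % 26 + ord('a'))
def shift_char (c : Char) (k : Int) : Char :=
  Char.ofNat ((PySem.Int.mod ((c.toNat : Int) - 97 + k) 26 + 97).toNat)

-- itertools.permutations(s) = PySem.List.permutations s.toList s.toList.length (same tuples;
-- order may differ from itertools but the result is a set, compared as a set).
-- ''.join(shift_char(c, k) for c in perm) = String.mk (perm.map (fun c => shift_char c k)).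
def get_k_shagram (s : String) (k : Int) : PySem.Set String :=
  (PySem.List.permutations s.toList s.toList.length).foldl
    (fun results perm =>
      PySem.Set.add results (String.mk (perm.map (fun c => shift_char c k))))
    PySem.Set.empty

-- the early 'return False' over the set/range loops is .all (order-independent)
def check_statement1 (selected_strings : List String) : Bool :=
  let length_1_words : PySem.Set String :=
    PySem.Set.ofList (selected_strings.filter (fun s => PySem.Str.len s == 1))
  length_1_words.all (fun word =>
    (PySem.List.pyRange 0 26 1).all (fun k =>
      (get_k_shagram word k).all (fun shagram => selected_strings.contains shagram)))

-- ===== PORT B =====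
def check_statement1_alt (selected_strings : List String) : Bool :=
  if !(selected_strings.any (fun s => PySem.Str.len s == 1)) then
    true
  else
    let present : PySem.Set String := PySem.Set.ofList selected_strings
    (PySem.List.pyRange 0 26 1).all (fun i =>
      PySem.Set.contains present (String.mk [Char.ofNat (97 + i).toNat]))

-- ===== PRECONDITION & SPEC =====
def Spec_check_statement1 (selected_strings : List String) (out : Bool) : Prop := out = check_statement1_alt selected_strings
instance (selected_strings : List String) (out : Bool) : Decidable (Spec_check_statement1 selected_strings out) := by unfold Spec_check_statement1; infer_instance

-- ===== CLAIM (what is proved, stated in full; the proofs are below) =====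
def Claim_equal_check_statement1 : Prop := ∀ (selected_strings : List String), Dom_check_statement1 selected_strings → Spec_check_statement1 selected_strings (check_statement1 selected_strings)

-- ===== LEMMAS AND PROOFS =====

-- the k-shagrams of a one-character string form the singleton {shift_char c k}
theorem shagram_singleton (s : String) (c : Char) (h : s.toList = [c]) (k : Int) :
    get_k_shagram s k = [String.mk [shift_char c k]] := by
  simp [get_k_shagram, h, PySem.List.permutations, PySem.Set.add, PySem.Set.empty]

-- as k runs over range(26), shift_char c k runs over exactly the 26 lowercase letters
theorem shift_all (p : Char → Bool) (c : Char) :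
    ((PySem.List.pyRange 0 26 1).all fun k => p (shift_char c k)) =
    ((PySem.List.pyRange 0 26 1).all fun i => p (Char.ofNat (97 + i).toNat)) := by
  rw [Bool.eq_iff_iff]
  simp only [List.all_eq_true, PySem.List.mem_pyRange_one, shift_char,
    PySem.Int.mod_eq_emod_of_pos (show (0:Int) < 26 by norm_num)]
  constructor
  · intro h i hi
    have hk : (0:Int) ≤ (i - ((c.toNat : Int) - 97)) % 26 ∧
        (i - ((c.toNat : Int) - 97)) % 26 < 26 := by omega
    have hh := h _ hk
    have harg : ((c.toNat : Int) - 97 + (i - ((c.toNat : Int) - 97)) % 26) % 26 + 97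
        = 97 + i := by omega
    rwa [harg] at hh
  · intro h k hk
    have hi : (0:Int) ≤ ((c.toNat : Int) - 97 + k) % 26 ∧
        ((c.toNat : Int) - 97 + k) % 26 < 26 := by omega
    have hh := h _ hi
    have harg : (97 : Int) + ((c.toNat : Int) - 97 + k) % 26
        = ((c.toNat : Int) - 97 + k) % 26 + 97 := by ring
    rwa [harg] at hh

-- membership in set(xs) is membership in xs
theorem contains_ofList (xs : List String) (a : String) :
    PySem.Set.contains (PySem.Set.ofList xs) a = xs.contains a := by
  rw [Bool.eq_iff_iff]
  simp [PySem.Set.mem_ofList]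

-- a .all over a nonempty list whose function is constant equals that constant
theorem all_const_of_ne_nil {a : Type} (xs : List a) (f : a → Bool) (b : Bool)
    (h : ∀ x ∈ xs, f x = b) (hne : xs ≠ []) : xs.all f = b := by
  cases xs with
  | nil => exact absurd rfl hne
  | cons y t =>
    rw [List.all_cons, h y (List.mem_cons_self)]
    cases b
    · simp
    · simp only [Bool.true_and, List.all_eq_true]
      intro x hx
      exact h x (List.mem_cons_of_mem y hx)

-- ===== VERDICT (by name: the statement is the Claim_ definition above) =====
theorem check_statement1_spec : Claim_equal_check_statement1 := by
  intro ss _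
  unfold Spec_check_statement1 check_statement1 check_statement1_alt
  by_cases hany : ss.any (fun s => PySem.Str.len s == 1)
  · -- some length-1 word exists
    simp only [hany, Bool.not_true, Bool.false_eq_true, if_false]
    obtain ⟨w0, hw0mem, hw0len⟩ := List.any_eq_true.mp hany
    have hQ : ∀ word ∈ PySem.Set.ofList (ss.filter (fun s => PySem.Str.len s == 1)),
        ((PySem.List.pyRange 0 26 1).all (fun k =>
          (get_k_shagram word k).all (fun sh => ss.contains sh))) =
        ((PySem.List.pyRange 0 26 1).all (fun i =>
          PySem.Set.contains (PySem.Set.ofList ss) (String.mk [Char.ofNat (97 + i).toNat]))) := by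
      intro word hw
      rw [PySem.Set.mem_ofList] at hw
      have hlen : word.toList.length = 1 := by
        have := (List.mem_filter.mp hw).2
        simpa [PySem.Str.len_eq] using this
      obtain ⟨c, hc⟩ := List.length_eq_one_iff.mp hlen
      have hinner : ∀ k : Int,
          ((get_k_shagram word k).all (fun sh => ss.contains sh)) =
          ss.contains (String.mk [shift_char c k]) := by
        intro k
        rw [shagram_singleton word c hc k]
        simp
      calc ((PySem.List.pyRange 0 26 1).all (fun k =>
              (get_k_shagram word k).all (fun sh => ss.contains sh)))
          = ((PySem.List.pyRange 0 26 1).all (fun k =>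
              ss.contains (String.mk [shift_char c k]))) := by
            simp only [hinner]
        _ = ((PySem.List.pyRange 0 26 1).all (fun i =>
              ss.contains (String.mk [Char.ofNat (97 + i).toNat]))) :=
            shift_all (fun ch => ss.contains (String.mk [ch])) c
        _ = _ := by
            simp only [← contains_ofList]
    have hw0set : w0 ∈ PySem.Set.ofList (ss.filter (fun s => PySem.Str.len s == 1)) := by
      rw [PySem.Set.mem_ofList, List.mem_filter]
      exact ⟨hw0mem, hw0len⟩
    exact all_const_of_ne_nil _ _ _ hQ (List.ne_nil_of_mem hw0set)
  · -- no length-1 word: the filter is empty and both sides are True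
    rw [Bool.not_eq_true] at hany
    simp only [hany, Bool.not_false, if_true]
    have hfil : ss.filter (fun s => PySem.Str.len s == 1) = [] := by
      rw [List.filter_eq_nil_iff]
      intro a ha hb
      have : ss.any (fun s => PySem.Str.len s == 1) = true :=
        List.any_eq_true.mpr ⟨a, ha, hb⟩
      rw [hany] at this
      exact Bool.false_ne_true this
    rw [hfil]
    rfl
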